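-- pv_equiv track=rewrite | github.com/vcerqueira/experiments-drift_evaluation | utils/streams/incremental_drift.py | extend_indices_to_spans
-- ===== SOURCE A (Python) =====
-- from typing import Union, List, Tuple, Optional, Any
--
-- def extend_indices_to_spans(indices: List[int], initial_length: int) -> List[int]:
--     """
--     Convert a list of indices to spans with specified initial length.
--
--     Args:
--         indices: List of indices
--         initial_length: Length of the first span
--
--     Returns:
--         List of span boundaries
--     """
--     if not indices:
--         return []
--
--     spans = [indices[0]]
--     current_length = initial_length
--
--     for i in range(1, len(indices)):
--         span_end = spans[-1] + current_length
--         spans.append(min(span_end, indices[i]))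
--         current_length = indices[i] - spans[-1]
--
--     spans.append(indices[-1] + current_length)
--     return spans
-- ===== SOURCE B (Python) =====
-- def extend_indices_to_spans(indices, initial_length):
--     if not indices:
--         return []
--     if len(indices) == 1:
--         return [indices[0], indices[0] + initial_length]
--     spans = [indices[0], min(indices[0] + initial_length, indices[1])]
--     spans.extend(min(a, b) for a, b in zip(indices[1:], indices[2:]))
--     spans.append(2 * indices[-1] - spans[-1])
--     return spans
-- ===== Notes on version B (the rewrite author's own statement) =====
-- stated objective: simpler
-- what changed: Eliminates the carried current_length/span_end state: each interior boundary is the local min of two adjacent indices (min(indices[k-1], indices[k])), the first boundary uses initial_length, and the final boundary is the reflection 2*indices[-1] - spans[-1].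
import Mathlib
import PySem

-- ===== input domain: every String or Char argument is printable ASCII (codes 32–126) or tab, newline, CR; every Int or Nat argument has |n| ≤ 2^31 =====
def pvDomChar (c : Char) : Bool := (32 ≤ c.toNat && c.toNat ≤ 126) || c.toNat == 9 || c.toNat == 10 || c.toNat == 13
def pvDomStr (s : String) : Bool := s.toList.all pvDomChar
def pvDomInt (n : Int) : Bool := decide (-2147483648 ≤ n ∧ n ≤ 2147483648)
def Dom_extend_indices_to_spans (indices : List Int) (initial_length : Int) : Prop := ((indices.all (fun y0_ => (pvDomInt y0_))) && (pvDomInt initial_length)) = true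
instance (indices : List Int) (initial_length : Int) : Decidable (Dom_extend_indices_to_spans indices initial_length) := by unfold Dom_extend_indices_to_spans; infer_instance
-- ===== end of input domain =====

-- B removes A's running current_length: each interior boundary is a local min of adjacent
-- indices, the final one a reflection (objective: simpler). No side effects; A is total.

-- ===== PORT A =====
-- loop of A: state = (spans[-1] = prev, current_length = cl, last consumed index = lastIdx);
-- each step appends min(prev + cl, v) and sets cl := v - new boundary; at the end appends indices[-1] + cl.
def pvAGo (prev cl lastIdx : Int) : List Int → List Int
  | [] => [lastIdx + cl]
  | v :: rest =>
      let s := min (prev + cl) v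
      s :: pvAGo s (v - s) v rest

def extend_indices_to_spans (indices : List Int) (initial_length : Int) : List Int :=
  match indices with
  | [] => []
  | x :: rest => x :: pvAGo x initial_length x rest

-- ===== PORT B =====
-- loop of B: emits min of each adjacent pair (sprev = last emitted boundary, p = previous index),
-- then the final reflection 2*indices[-1] - spans[-1].
def pvBGo (sprev p : Int) : List Int → List Int
  | [] => [2 * p - sprev]
  | v :: rest => min p v :: pvBGo (min p v) v rest

def extend_indices_to_spans_alt (indices : List Int) (initial_length : Int) : List Int :=
  match indices with
  | [] => []
  | [x] => [x, x + initial_length]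
  | x :: y :: rest =>
      let s1 := min (x + initial_length) y
      x :: s1 :: pvBGo s1 y rest

-- ===== PRECONDITION & SPEC =====
def Spec_extend_indices_to_spans (indices : List Int) (initial_length : Int) (out : List Int) : Prop := out = extend_indices_to_spans_alt indices initial_length
instance (indices : List Int) (initial_length : Int) (out : List Int) : Decidable (Spec_extend_indices_to_spans indices initial_length out) := by unfold Spec_extend_indices_to_spans; infer_instance

-- ===== CLAIM (what is proved, stated in full; the proofs are below) =====
def Claim_equal_extend_indices_to_spans : Prop := ∀ (indices : List Int) (initial_length : Int), Dom_extend_indices_to_spans indices initial_length → Spec_extend_indices_to_spans indices initial_length (extend_indices_to_spans indices initial_length)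

-- ===== LEMMAS AND PROOFS =====

theorem pvGo_eq (rest : List Int) : ∀ (s v : Int), pvAGo s (v - s) v rest = pvBGo s v rest := by
  induction rest with
  | nil => intro s v; simp [pvAGo, pvBGo]; ring
  | cons w r ih =>
      intro s v
      simp only [pvAGo, pvBGo, show ∀ s v : Int, s + (v - s) = v from fun s v => by ring]
      rw [ih]

-- ===== VERDICT (by name: the statement is the Claim_ definition above) =====
theorem extend_indices_to_spans_spec : Claim_equal_extend_indices_to_spans := by
  intro indices il _
  unfold Spec_extend_indices_to_spans
  match indices with
  | [] => rfl
  | [x] => simp [extend_indices_to_spans, extend_indices_to_spans_alt, pvAGo]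
  | x :: y :: rest =>
      simp only [extend_indices_to_spans, extend_indices_to_spans_alt, pvAGo]
      rw [pvGo_eq]
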